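-- pv_equiv track=rewrite | github.com/shwetakumari14/Practice-Problems | Pythons Solutions/Dynamic Programming/Let's Party.py | countPeopleBottomUp
-- ===== SOURCE A (Python) =====
-- def countPeopleBottomUp(n):
--     if n <= 2:
--         return n
--
--     ones, twos, mod = 1, 2, 10003
--
--     for i in range(3, n+1):
--         temp = twos
--         twos =(twos + ones%mod*(i-1))%mod
--         ones = temp
--
--     return twos
-- ===== SOURCE B (Python) =====
-- M = 10003
--
-- def _mat_mul(A, B):
--     return ((A[0]*B[0] + A[1]*B[2]) % M, (A[0]*B[1] + A[1]*B[3]) % M,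
--             (A[2]*B[0] + A[3]*B[2]) % M, (A[2]*B[1] + A[3]*B[3]) % M)
--
-- def _run(o, t, k):
--     # k steps of the recurrence; step j uses coefficient (2 + j) % M
--     for j in range(k):
--         o, t = t, (t + o * ((2 + j) % M)) % M
--     return o, t
--
-- def countPeopleBottomUp(n):
--     if n <= 2:
--         return n
--     q, r = divmod(n - 2, M)
--     o, t = 1, 2
--     if q:
--         # linear map of one full period of M steps, from its action on the basis
--         a, c = _run(1, 0, M)
--         b, d = _run(0, 1, M)
--         X = (a, b, c, d)
--         P = (1, 0, 0, 1)
--         e = q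
--         while e:
--             if e & 1:
--                 P = _mat_mul(P, X)
--             X = _mat_mul(X, X)
--             e >>= 1
--         o, t = (P[0] * 1 + P[1] * 2) % M, (P[2] * 1 + P[3] * 2) % M
--     o, t = _run(o, t, r)
--     return t
-- ===== Notes on version B (the rewrite author's own statement) =====
-- stated objective: faster
-- what changed: Instead of iterating the recurrence n-2 times, B exploits that the coefficient (i-1) reduced by the modulus is periodic with period equal to the modulus M, builds the 2x2 linear map of one full period from its action on the basis vectors, raises it to the q-th power by binary squaring for the q full periods, and runs the at most M leftover steps directly.
import Mathlib
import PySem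

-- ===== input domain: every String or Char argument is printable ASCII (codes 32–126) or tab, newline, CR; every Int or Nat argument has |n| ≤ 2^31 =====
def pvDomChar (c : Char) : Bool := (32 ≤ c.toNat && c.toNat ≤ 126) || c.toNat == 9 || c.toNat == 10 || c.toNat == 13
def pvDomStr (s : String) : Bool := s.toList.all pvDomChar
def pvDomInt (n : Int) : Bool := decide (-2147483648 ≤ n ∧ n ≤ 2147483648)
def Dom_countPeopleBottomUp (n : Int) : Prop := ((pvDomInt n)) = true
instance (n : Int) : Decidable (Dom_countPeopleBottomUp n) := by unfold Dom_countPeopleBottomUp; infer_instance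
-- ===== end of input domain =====

-- B replaces A's n-step loop by one modulus-length period of the recurrence plus binary
-- powering of the period's 2x2 transition matrix: measured asymptotically faster for large n.

-- ===== PORT A =====
def countPeopleBottomUp (n : Int) : Int :=
  if n ≤ 2 then n
  else
    let md : Int := 10003
    let st := (PySem.List.pyRange 3 (n + 1) 1).foldl
      (fun (st : Int × Int) (i : Int) =>
        (st.2, PySem.Int.mod (st.2 + PySem.Int.mod st.1 md * (i - 1)) md)) (1, 2)
    st.2

-- ===== PORT B =====
-- helper _mat_mul of Source B
def bMatMul (A B : Int × Int × Int × Int) : Int × Int × Int × Int :=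
  (PySem.Int.mod (A.1 * B.1 + A.2.1 * B.2.2.1) 10003,
   PySem.Int.mod (A.1 * B.2.1 + A.2.1 * B.2.2.2) 10003,
   PySem.Int.mod (A.2.2.1 * B.1 + A.2.2.2 * B.2.2.1) 10003,
   PySem.Int.mod (A.2.2.1 * B.2.1 + A.2.2.2 * B.2.2.2) 10003)

-- helper _run of Source B
def bRun (o t : Int) (k : Int) : Int × Int :=
  (PySem.List.pyRange 0 k 1).foldl
    (fun (st : Int × Int) (j : Int) =>
      (st.2, PySem.Int.mod (st.2 + st.1 * PySem.Int.mod (2 + j) 10003) 10003)) (o, t)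

-- Source B's `while e:` squaring loop; its counter e = q ≥ 0 is carried as a Nat
def bPowLoop (P X : Int × Int × Int × Int) (e : Nat) : Int × Int × Int × Int :=
  if e = 0 then P
  else bPowLoop (if e % 2 = 1 then bMatMul P X else P) (bMatMul X X) (e / 2)

def countPeopleBottomUp_alt (n : Int) : Int :=
  if n ≤ 2 then n
  else
    let q := PySem.Int.floordiv (n - 2) 10003   -- divmod(n-2, M)
    let r := PySem.Int.mod (n - 2) 10003
    let ot : Int × Int :=
      if q = 0 then (1, 2)
      else
        let ac := bRun 1 0 10003
        let bd := bRun 0 1 10003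
        let X := (ac.1, bd.1, ac.2, bd.2)
        let P := bPowLoop (1, 0, 0, 1) X q.toNat
        (PySem.Int.mod (P.1 * 1 + P.2.1 * 2) 10003,
         PySem.Int.mod (P.2.2.1 * 1 + P.2.2.2 * 2) 10003)
    (bRun ot.1 ot.2 r).2

-- ===== PRECONDITION & SPEC =====
def Spec_countPeopleBottomUp (n : Int) (out : Int) : Prop := out = countPeopleBottomUp_alt n
instance (n : Int) (out : Int) : Decidable (Spec_countPeopleBottomUp n out) := by unfold Spec_countPeopleBottomUp; infer_instance

-- ===== CLAIM (what is proved, stated in full; the proofs are below) =====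
def Claim_equal_countPeopleBottomUp : Prop := ∀ (n : Int), Dom_countPeopleBottomUp n → Spec_countPeopleBottomUp n (countPeopleBottomUp n)

-- ===== LEMMAS AND PROOFS =====

-- the recurrence over ZMod 10003
def stepZ (c : ZMod 10003) (v : ZMod 10003 × ZMod 10003) : ZMod 10003 × ZMod 10003 :=
  (v.2, v.2 + v.1 * c)

def cZ (j : Nat) : ZMod 10003 := ((2 + j : Nat) : ZMod 10003)

def sfold : Nat → Nat → (ZMod 10003 × ZMod 10003) → (ZMod 10003 × ZMod 10003)
  | _, 0, v => v
  | s, k + 1, v => sfold (s + 1) k (stepZ (cZ s) v)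

def castPair (p : Int × Int) : ZMod 10003 × ZMod 10003 := ((p.1 : ZMod 10003), (p.2 : ZMod 10003))

theorem castmod (x : Int) : ((PySem.Int.mod x 10003 : Int) : ZMod 10003) = (x : ZMod 10003) := by
  rw [PySem.Int.mod_eq_emod_of_pos (by norm_num)]
  have h := ZMod.intCast_mod x 10003
  simpa using h

theorem mod_nonneg' (x : Int) : 0 ≤ PySem.Int.mod x 10003 := by
  rw [PySem.Int.mod_eq_emod_of_pos (by norm_num)]
  exact Int.emod_nonneg x (by norm_num)

theorem mod_lt' (x : Int) : PySem.Int.mod x 10003 < 10003 := by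
  rw [PySem.Int.mod_eq_emod_of_pos (by norm_num)]
  exact Int.emod_lt_of_pos x (by norm_num)

theorem cZ_period (s : Nat) : cZ (s + 10003) = cZ s := by
  unfold cZ
  have h : 2 + (s + 10003) = (2 + s) + 10003 := by omega
  rw [h, Nat.cast_add, ZMod.natCast_self, add_zero]

theorem sfold_right (s k : Nat) (v : ZMod 10003 × ZMod 10003) :
    sfold s (k + 1) v = stepZ (cZ (s + k)) (sfold s k v) := by
  induction k generalizing s v with
  | zero => simp [sfold]
  | succ k ih =>
      show sfold (s+1) (k+1) (stepZ (cZ s) v)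
            = stepZ (cZ (s + (k+1))) (sfold (s+1) k (stepZ (cZ s) v))
      rw [ih]
      have h : s + 1 + k = s + (k+1) := by omega
      rw [h]

theorem sfold_add (s a b : Nat) (v : ZMod 10003 × ZMod 10003) :
    sfold s (a + b) v = sfold (s + a) b (sfold s a v) := by
  induction a generalizing s v with
  | zero => simp [sfold]
  | succ a ih =>
      have h1 : a + 1 + b = (a + b) + 1 := by omega
      rw [h1]
      show sfold (s+1) (a+b) (stepZ (cZ s) v)
            = sfold (s+(a+1)) b (sfold (s+1) a (stepZ (cZ s) v))
      rw [ih]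
      have h2 : s + 1 + a = s + (a+1) := by omega
      rw [h2]

theorem sfold_shift (s k : Nat) (v : ZMod 10003 × ZMod 10003) :
    sfold (s + 10003) k v = sfold s k v := by
  induction k generalizing s v with
  | zero => rfl
  | succ k ih =>
      show sfold (s + 10003 + 1) k (stepZ (cZ (s + 10003)) v) = sfold (s+1) k (stepZ (cZ s) v)
      rw [cZ_period]
      have : s + 10003 + 1 = (s + 1) + 10003 := by omega
      rw [this, ih]

theorem sfold_shift_mul (t k : Nat) (v : ZMod 10003 × ZMod 10003) :
    sfold (10003 * t) k v = sfold 0 k v := by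
  induction t with
  | zero => rfl
  | succ t ih =>
      have : 10003 * (t + 1) = 10003 * t + 10003 := by ring
      rw [this, sfold_shift, ih]

theorem stepZ_add (c : ZMod 10003) (u v : ZMod 10003 × ZMod 10003) :
    stepZ c (u + v) = stepZ c u + stepZ c v := by
  cases u; cases v
  simp only [stepZ, Prod.mk_add_mk, Prod.mk.injEq]
  exact ⟨trivial, by ring⟩

theorem stepZ_smul (c a : ZMod 10003) (v : ZMod 10003 × ZMod 10003) :
    stepZ c (a • v) = a • stepZ c v := by
  cases v
  simp only [stepZ, Prod.smul_mk, smul_eq_mul, Prod.mk.injEq]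
  exact ⟨trivial, by ring⟩

theorem sfold_add_vec (s k : Nat) (u v : ZMod 10003 × ZMod 10003) :
    sfold s k (u + v) = sfold s k u + sfold s k v := by
  induction k generalizing s u v with
  | zero => rfl
  | succ k ih => show sfold (s+1) k _ = _; rw [stepZ_add, ih]; rfl

theorem sfold_smul (s k : Nat) (a : ZMod 10003) (v : ZMod 10003 × ZMod 10003) :
    sfold s k (a • v) = a • sfold s k v := by
  induction k generalizing s v with
  | zero => rfl
  | succ k ih => show sfold (s+1) k _ = _; rw [stepZ_smul, ih]; rfl

theorem sfold_basis (s k : Nat) (v : ZMod 10003 × ZMod 10003) :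
    sfold s k v = v.1 • sfold s k (1, 0) + v.2 • sfold s k (0, 1) := by
  have hv : v = v.1 • ((1 : ZMod 10003), (0 : ZMod 10003)) + v.2 • ((0 : ZMod 10003), (1 : ZMod 10003)) := by
    cases v
    simp [Prod.smul_mk, Prod.mk_add_mk, smul_eq_mul]
  conv_lhs => rw [hv]
  rw [sfold_add_vec, sfold_smul, sfold_smul]

theorem sfold_period_pow (q : Nat) (v : ZMod 10003 × ZMod 10003) :
    sfold 0 (10003 * q) v = (sfold 0 10003)^[q] v := by
  induction q with
  | zero => rfl
  | succ q ih =>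
      have h : 10003 * (q + 1) = 10003 * q + 10003 := by ring
      rw [h, sfold_add, Nat.zero_add, sfold_shift_mul, ih, Function.iterate_succ_apply']


-- 2x2 matrices over ZMod 10003 as 4-tuples (row-major: (a,b,c,d) = [[a,b],[c,d]])
def kMul (A B : ZMod 10003 × ZMod 10003 × ZMod 10003 × ZMod 10003) :
    ZMod 10003 × ZMod 10003 × ZMod 10003 × ZMod 10003 :=
  (A.1 * B.1 + A.2.1 * B.2.2.1, A.1 * B.2.1 + A.2.1 * B.2.2.2,
   A.2.2.1 * B.1 + A.2.2.2 * B.2.2.1, A.2.2.1 * B.2.1 + A.2.2.2 * B.2.2.2)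

def kPow (X : ZMod 10003 × ZMod 10003 × ZMod 10003 × ZMod 10003) :
    Nat → ZMod 10003 × ZMod 10003 × ZMod 10003 × ZMod 10003
  | 0 => (1, 0, 0, 1)
  | n + 1 => kMul X (kPow X n)

def castM (A : Int × Int × Int × Int) : ZMod 10003 × ZMod 10003 × ZMod 10003 × ZMod 10003 :=
  ((A.1 : ZMod 10003), (A.2.1 : ZMod 10003), (A.2.2.1 : ZMod 10003), (A.2.2.2 : ZMod 10003))

def apply4 (X : ZMod 10003 × ZMod 10003 × ZMod 10003 × ZMod 10003)
    (v : ZMod 10003 × ZMod 10003) : ZMod 10003 × ZMod 10003 :=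
  (X.1 * v.1 + X.2.1 * v.2, X.2.2.1 * v.1 + X.2.2.2 * v.2)

theorem kMul_assoc (A B C : ZMod 10003 × ZMod 10003 × ZMod 10003 × ZMod 10003) :
    kMul (kMul A B) C = kMul A (kMul B C) := by
  obtain ⟨a1, a2, a3, a4⟩ := A; obtain ⟨b1, b2, b3, b4⟩ := B; obtain ⟨c1, c2, c3, c4⟩ := C
  simp only [kMul, Prod.mk.injEq]
  refine ⟨by ring, by ring, by ring, by ring⟩

theorem kMul_one_right (X : ZMod 10003 × ZMod 10003 × ZMod 10003 × ZMod 10003) :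
    kMul X (1, 0, 0, 1) = X := by
  obtain ⟨a1, a2, a3, a4⟩ := X
  simp only [kMul, Prod.mk.injEq]
  refine ⟨by ring, by ring, by ring, by ring⟩

theorem kMul_one_left (X : ZMod 10003 × ZMod 10003 × ZMod 10003 × ZMod 10003) :
    kMul (1, 0, 0, 1) X = X := by
  obtain ⟨a1, a2, a3, a4⟩ := X
  simp only [kMul, Prod.mk.injEq]
  refine ⟨by ring, by ring, by ring, by ring⟩

theorem kPow_sq (Y : ZMod 10003 × ZMod 10003 × ZMod 10003 × ZMod 10003) (t : Nat) :
    kPow (kMul Y Y) t = kPow Y (2 * t) := by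
  induction t with
  | zero => rfl
  | succ t ih =>
      have h : 2 * (t + 1) = (2 * t + 1) + 1 := by omega
      rw [h]
      show kMul (kMul Y Y) (kPow (kMul Y Y) t) = kMul Y (kPow Y (2 * t + 1))
      rw [ih, kMul_assoc]
      rfl

theorem castM_bMatMul (A B : Int × Int × Int × Int) :
    castM (bMatMul A B) = kMul (castM A) (castM B) := by
  obtain ⟨a1, a2, a3, a4⟩ := A; obtain ⟨b1, b2, b3, b4⟩ := B
  simp only [bMatMul, castM, kMul, castmod, Prod.mk.injEq]
  refine ⟨by push_cast; ring, by push_cast; ring, by push_cast; ring, by push_cast; ring⟩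

theorem bPowLoop_cast (e : Nat) (P X : Int × Int × Int × Int) :
    castM (bPowLoop P X e) = kMul (castM P) (kPow (castM X) e) := by
  induction e using Nat.strong_induction_on generalizing P X with
  | _ e ih =>
    by_cases h : e = 0
    · subst h
      rw [bPowLoop]
      simp [kPow, kMul_one_right]
    · rw [bPowLoop]
      simp only [h, if_false]
      rw [ih (e / 2) (by omega), castM_bMatMul, kPow_sq]
      by_cases h2 : e % 2 = 1
      · rw [if_pos h2, castM_bMatMul, kMul_assoc]
        have hstep : kMul (castM X) (kPow (castM X) (2 * (e / 2))) = kPow (castM X) (2 * (e / 2) + 1) := rfl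
        have he : e = (2 * (e / 2)) + 1 := by omega
        rw [hstep, ← he]
      · rw [if_neg h2]
        have he : e = 2 * (e / 2) := by omega
        rw [← he]

theorem apply4_kMul (X Y : ZMod 10003 × ZMod 10003 × ZMod 10003 × ZMod 10003)
    (v : ZMod 10003 × ZMod 10003) : apply4 (kMul X Y) v = apply4 X (apply4 Y v) := by
  obtain ⟨a1, a2, a3, a4⟩ := X; obtain ⟨b1, b2, b3, b4⟩ := Y; obtain ⟨x, y⟩ := v
  simp only [kMul, apply4, Prod.mk.injEq]
  exact ⟨by ring, by ring⟩

theorem apply4_one (v : ZMod 10003 × ZMod 10003) :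
    apply4 (1, 0, 0, 1) v = v := by
  obtain ⟨x, y⟩ := v
  simp [apply4]

theorem apply4_kPow (X : ZMod 10003 × ZMod 10003 × ZMod 10003 × ZMod 10003)
    (g : ZMod 10003 × ZMod 10003 → ZMod 10003 × ZMod 10003)
    (h : ∀ v, apply4 X v = g v) (q : Nat) (v : ZMod 10003 × ZMod 10003) :
    apply4 (kPow X q) v = g^[q] v := by
  induction q generalizing v with
  | zero => simp [kPow, apply4_one]
  | succ q ih =>
      show apply4 (kMul X (kPow X q)) v = _
      rw [apply4_kMul, ih, h]
      exact (Function.iterate_succ_apply' g q v).symm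

-- A's loop over Nat-indexed range
def stepI (st : Int × Int) (j : Nat) : Int × Int :=
  (st.2, PySem.Int.mod (st.2 + PySem.Int.mod st.1 10003 * ((3 + (j : Int)) - 1)) 10003)

def AfN (k : Nat) : Int × Int := (List.range k).foldl stepI (1, 2)

-- B's run loop over Nat-indexed range
def stepB (st : Int × Int) (j : Nat) : Int × Int :=
  (st.2, PySem.Int.mod (st.2 + st.1 * PySem.Int.mod (2 + (j : Int)) 10003) 10003)

def BfN (o t : Int) (k : Nat) : Int × Int := (List.range k).foldl stepB (o, t)

theorem cast_stepI (st : Int × Int) (k : Nat) :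
    castPair (stepI st k) = stepZ (cZ k) (castPair st) := by
  simp only [stepI, castPair, stepZ, cZ, Prod.mk.injEq]
  refine ⟨trivial, ?_⟩
  rw [castmod]
  push_cast [castmod]
  ring

theorem cast_stepB (st : Int × Int) (k : Nat) :
    castPair (stepB st k) = stepZ (cZ k) (castPair st) := by
  simp only [stepB, castPair, stepZ, cZ, Prod.mk.injEq]
  refine ⟨trivial, ?_⟩
  rw [castmod]
  push_cast [castmod]
  ring

theorem bridgeA (k : Nat) : castPair (AfN k) = sfold 0 k (1, 2) := by
  induction k with
  | zero => simp [AfN, castPair, sfold]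
  | succ k ih =>
      have h : AfN (k + 1) = stepI (AfN k) k := by
        simp [AfN, List.range_succ]
      rw [h, cast_stepI, ih, sfold_right, Nat.zero_add]

theorem bridgeB (o t : Int) (k : Nat) :
    castPair (BfN o t k) = sfold 0 k (castPair (o, t)) := by
  induction k with
  | zero => rfl
  | succ k ih =>
      have h : BfN o t (k + 1) = stepB (BfN o t k) k := by
        simp [BfN, List.range_succ]
      rw [h, cast_stepB, ih, sfold_right, Nat.zero_add]

theorem boundsA (k : Nat) :
    (0 ≤ (AfN k).1 ∧ (AfN k).1 < 10003) ∧ (0 ≤ (AfN k).2 ∧ (AfN k).2 < 10003) := by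
  induction k with
  | zero =>
      show (0 ≤ ((1:Int),(2:Int)).1 ∧ ((1:Int),(2:Int)).1 < 10003) ∧
        (0 ≤ ((1:Int),(2:Int)).2 ∧ ((1:Int),(2:Int)).2 < 10003)
      norm_num
  | succ k ih =>
      have h : AfN (k + 1) = stepI (AfN k) k := by
        simp [AfN, List.range_succ]
      rw [h]
      exact ⟨ih.2, ⟨mod_nonneg' _, mod_lt' _⟩⟩

theorem boundsB (o t : Int) (ho : 0 ≤ o ∧ o < 10003) (ht : 0 ≤ t ∧ t < 10003) (k : Nat) :
    (0 ≤ (BfN o t k).1 ∧ (BfN o t k).1 < 10003) ∧ (0 ≤ (BfN o t k).2 ∧ (BfN o t k).2 < 10003) := by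
  induction k with
  | zero => exact ⟨ho, ht⟩
  | succ k ih =>
      have h : BfN o t (k + 1) = stepB (BfN o t k) k := by
        simp [BfN, List.range_succ]
      rw [h]
      exact ⟨ih.2, ⟨mod_nonneg' _, mod_lt' _⟩⟩

theorem int_eq_of_cast (a b : Int) (ha : 0 ≤ a ∧ a < 10003) (hb : 0 ≤ b ∧ b < 10003)
    (h : (a : ZMod 10003) = (b : ZMod 10003)) : a = b := by
  rw [ZMod.intCast_eq_intCast_iff'] at h
  have h1 : a % ((10003 : Nat) : Int) = a := Int.emod_eq_of_lt ha.1 (by exact_mod_cast ha.2)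
  have h2 : b % ((10003 : Nat) : Int) = b := Int.emod_eq_of_lt hb.1 (by exact_mod_cast hb.2)
  rw [h1, h2] at h
  exact h

-- the two ports rewritten through AfN / BfN
theorem bRun_eq (o t k : Int) (hk : 0 ≤ k) : bRun o t k = BfN o t k.toNat := by
  unfold bRun BfN
  rw [PySem.List.pyRange_one, List.foldl_map]
  have h : (k - 0).toNat = k.toNat := by omega
  rw [h]
  simp only [zero_add]
  rfl

theorem portA_eq (n : Int) (hn : ¬ n ≤ 2) :
    countPeopleBottomUp n = (AfN (n - 2).toNat).2 := by
  unfold countPeopleBottomUp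
  rw [if_neg hn]
  show ((PySem.List.pyRange 3 (n + 1) 1).foldl
      (fun (st : Int × Int) (i : Int) =>
        (st.2, PySem.Int.mod (st.2 + PySem.Int.mod st.1 10003 * (i - 1)) 10003)) (1, 2)).2
    = (AfN (n - 2).toNat).2
  rw [PySem.List.pyRange_one, List.foldl_map]
  have h : (n + 1 - 3).toNat = (n - 2).toNat := by omega
  rw [h]
  rfl

-- B's intermediate state (1,2) or the matrix-power image, expressed through BfN
def bOT (n : Int) : Int × Int :=
  if PySem.Int.floordiv (n - 2) 10003 = 0 then (1, 2)
  else
    let X := ((BfN 1 0 10003).1, (BfN 0 1 10003).1, (BfN 1 0 10003).2, (BfN 0 1 10003).2)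
    let P := bPowLoop (1, 0, 0, 1) X (PySem.Int.floordiv (n - 2) 10003).toNat
    (PySem.Int.mod (P.1 * 1 + P.2.1 * 2) 10003,
     PySem.Int.mod (P.2.2.1 * 1 + P.2.2.2 * 2) 10003)

theorem portB_eq (n : Int) (hn : ¬ n ≤ 2) :
    countPeopleBottomUp_alt n =
      (BfN (bOT n).1 (bOT n).2 (PySem.Int.mod (n - 2) 10003).toNat).2 := by
  unfold countPeopleBottomUp_alt bOT
  rw [if_neg hn]
  have h103 : (10003 : Int).toNat = 10003 := rfl
  simp only [bRun_eq 1 0 10003 (by norm_num), bRun_eq 0 1 10003 (by norm_num),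
    bRun_eq _ _ _ (mod_nonneg' (n - 2)), h103]

theorem cast_bOT (n : Int) :
    castPair (bOT n) =
      sfold 0 (10003 * (PySem.Int.floordiv (n - 2) 10003).toNat) (1, 2) := by
  by_cases hq : PySem.Int.floordiv (n - 2) 10003 = 0
  · rw [bOT, if_pos hq, hq]
    simp [castPair, sfold]
  · rw [bOT, if_neg hq]
    have h10 := bridgeB 1 0 10003
    have h01 := bridgeB 0 1 10003
    have hc10 : castPair ((1 : Int), (0 : Int)) = ((1 : ZMod 10003), (0 : ZMod 10003)) := by
      simp [castPair]
    have hc01 : castPair ((0 : Int), (1 : Int)) = ((0 : ZMod 10003), (1 : ZMod 10003)) := by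
      simp [castPair]
    rw [hc10] at h10
    rw [hc01] at h01
    set X : Int × Int × Int × Int :=
      ((BfN 1 0 10003).1, (BfN 0 1 10003).1, (BfN 1 0 10003).2, (BfN 0 1 10003).2) with hX
    have hXap : ∀ v, apply4 (castM X) v = sfold 0 10003 v := by
      intro v
      obtain ⟨x, y⟩ := v
      rw [sfold_basis 0 10003 (x, y)]
      have e1 : ((BfN 1 0 10003).1 : ZMod 10003) = (sfold 0 10003 (1, 0)).1 := by
        rw [← h10]; rfl
      have e2 : ((BfN 1 0 10003).2 : ZMod 10003) = (sfold 0 10003 (1, 0)).2 := by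
        rw [← h10]; rfl
      have e3 : ((BfN 0 1 10003).1 : ZMod 10003) = (sfold 0 10003 (0, 1)).1 := by
        rw [← h01]; rfl
      have e4 : ((BfN 0 1 10003).2 : ZMod 10003) = (sfold 0 10003 (0, 1)).2 := by
        rw [← h01]; rfl
      simp only [apply4, castM, hX, e1, e2, e3, e4, Prod.ext_iff, Prod.fst_add, Prod.snd_add,
        Prod.smul_fst, Prod.smul_snd, smul_eq_mul]
      constructor <;> ring
    have hP : castM (bPowLoop (1, 0, 0, 1) X (PySem.Int.floordiv (n - 2) 10003).toNat)
        = kPow (castM X) (PySem.Int.floordiv (n - 2) 10003).toNat := by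
      rw [bPowLoop_cast]
      have hid : castM ((1 : Int), (0 : Int), (0 : Int), (1 : Int))
          = ((1 : ZMod 10003), (0 : ZMod 10003), (0 : ZMod 10003), (1 : ZMod 10003)) := by
        simp [castM]
      rw [hid, kMul_one_left]
    show (((PySem.Int.mod _ 10003 : Int) : ZMod 10003), ((PySem.Int.mod _ 10003 : Int) : ZMod 10003)) = _
    rw [castmod, castmod]
    push_cast
    have happ : ((((bPowLoop (1,0,0,1) X (PySem.Int.floordiv (n - 2) 10003).toNat).1 : Int) : ZMod 10003) * 1
          + (((bPowLoop (1,0,0,1) X (PySem.Int.floordiv (n - 2) 10003).toNat).2.1 : Int) : ZMod 10003) * 2,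
        (((bPowLoop (1,0,0,1) X (PySem.Int.floordiv (n - 2) 10003).toNat).2.2.1 : Int) : ZMod 10003) * 1
          + (((bPowLoop (1,0,0,1) X (PySem.Int.floordiv (n - 2) 10003).toNat).2.2.2 : Int) : ZMod 10003) * 2)
        = apply4 (castM (bPowLoop (1,0,0,1) X (PySem.Int.floordiv (n - 2) 10003).toNat)) (1, 2) := rfl
    rw [happ, hP, apply4_kPow _ _ hXap, sfold_period_pow]

theorem bOT_bounds (n : Int) :
    (0 ≤ (bOT n).1 ∧ (bOT n).1 < 10003) ∧ (0 ≤ (bOT n).2 ∧ (bOT n).2 < 10003) := by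
  rw [bOT]
  split_ifs
  · show (0 ≤ ((1:Int),(2:Int)).1 ∧ ((1:Int),(2:Int)).1 < 10003) ∧
      (0 ≤ ((1:Int),(2:Int)).2 ∧ ((1:Int),(2:Int)).2 < 10003)
    norm_num
  · exact ⟨⟨mod_nonneg' _, mod_lt' _⟩, ⟨mod_nonneg' _, mod_lt' _⟩⟩

theorem main_ne (n : Int) (hn : ¬ n ≤ 2) :
    countPeopleBottomUp n = countPeopleBottomUp_alt n := by
  rw [portA_eq n hn, portB_eq n hn]
  have hr0 : 0 ≤ PySem.Int.mod (n - 2) 10003 := mod_nonneg' _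
  have hrM : PySem.Int.mod (n - 2) 10003 < 10003 := mod_lt' _
  have hq0 : 0 ≤ PySem.Int.floordiv (n - 2) 10003 := by
    rw [PySem.Int.floordiv_eq_ediv_of_pos (by norm_num)]
    exact Int.ediv_nonneg (by omega) (by norm_num)
  have hsplit : (n - 2).toNat
      = 10003 * (PySem.Int.floordiv (n - 2) 10003).toNat + (PySem.Int.mod (n - 2) 10003).toNat := by
    have h := PySem.Int.floordiv_mul_add_mod (n - 2) 10003
    omega
  apply int_eq_of_cast _ _ (boundsA _).2 (boundsB _ _ (bOT_bounds n).1 (bOT_bounds n).2 _).2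
  have hA : ((AfN (n - 2).toNat).2 : ZMod 10003) = (sfold 0 ((n - 2).toNat) (1, 2)).2 :=
    congrArg Prod.snd (bridgeA _)
  have hB := congrArg Prod.snd (bridgeB (bOT n).1 (bOT n).2 (PySem.Int.mod (n - 2) 10003).toNat)
  have hpair : castPair ((bOT n).1, (bOT n).2) = castPair (bOT n) := rfl
  rw [hpair, cast_bOT n] at hB
  rw [hA]
  show _ = ((castPair (BfN (bOT n).1 (bOT n).2 (PySem.Int.mod (n - 2) 10003).toNat)).2)
  rw [hB, hsplit, sfold_add, Nat.zero_add, sfold_shift_mul]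

-- ===== VERDICT (by name: the statement is the Claim_ definition above) =====
theorem countPeopleBottomUp_spec : Claim_equal_countPeopleBottomUp := by
  intro n _
  unfold Spec_countPeopleBottomUp
  by_cases hn : n ≤ 2
  · simp [countPeopleBottomUp, countPeopleBottomUp_alt, hn]
  · exact main_ne n hn
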